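-- pv_equiv track=rewrite | github.com/yganalyst/daily-algorithm | codility/15_CountDistinctSlices.py | solution
-- ===== SOURCE A (Python) =====
-- def solution(M, A):
--     n=len(A)
--     answer=0
--     cum_sum=1
--     add_n=2
--     for i in range(n-1):
--         if A[i]!=A[i+1]:
--             cum_sum += add_n
--             add_n+=1
--         else:
--             answer+=cum_sum
--             cum_sum=1
--             add_n=2
--     answer+=cum_sum
--     return answer
-- ===== SOURCE B (Python) =====
-- def solution(M, A):
--     # Two passes: collect run lengths between equal adjacent elements,
--     # then sum closed-form triangular numbers m*(m+1)//2 per run.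
--     runs = []
--     length = 1
--     for i in range(len(A) - 1):
--         if A[i] == A[i + 1]:
--             runs.append(length)
--             length = 1
--         else:
--             length += 1
--     runs.append(length)
--     return sum(m * (m + 1) // 2 for m in runs)
-- ===== Notes on version B (the rewrite author's own statement) =====
-- stated objective: simpler
-- what changed: Replaces A's single-pass incremental cum_sum/add_n accumulation with a two-pass decomposition: first collect the run lengths between equal adjacent elements, then sum the closed-form triangular number m*(m+1)//2 for each run.
import Mathlib
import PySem

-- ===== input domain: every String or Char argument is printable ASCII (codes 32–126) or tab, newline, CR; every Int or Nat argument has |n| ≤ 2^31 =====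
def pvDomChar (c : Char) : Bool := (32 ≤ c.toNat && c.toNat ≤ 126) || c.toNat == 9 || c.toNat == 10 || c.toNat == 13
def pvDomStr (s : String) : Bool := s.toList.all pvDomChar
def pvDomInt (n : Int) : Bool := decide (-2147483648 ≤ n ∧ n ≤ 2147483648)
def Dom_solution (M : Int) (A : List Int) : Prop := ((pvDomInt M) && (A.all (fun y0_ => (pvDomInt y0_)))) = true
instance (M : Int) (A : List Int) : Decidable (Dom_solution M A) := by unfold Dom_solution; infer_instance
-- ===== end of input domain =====

-- B replaces A's single-pass incremental cum_sum/add_n accumulation by a two-pass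
-- decomposition (collect run lengths, then sum closed-form triangular numbers); simpler, same cost.

-- ===== PORT A =====
-- A's 'for i in range(n-1)' loop walks adjacent pairs A[i], A[i+1]; ported as the
-- structural recursion over those pairs with the same (answer, cum_sum, add_n) state.
def solutionLoop (answer cum_sum add_n : Int) : List Int → Int
  | x :: y :: rest =>
      if x ≠ y then solutionLoop answer (cum_sum + add_n) (add_n + 1) (y :: rest)
      else solutionLoop (answer + cum_sum) 1 2 (y :: rest)
  | _ => answer + cum_sum

def solution (M : Int) (A : List Int) : Int := solutionLoop 0 1 2 A

-- ===== PORT B =====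
-- first pass: run lengths between equal adjacent elements (length seeded at 1)
def runsAux (length : Int) : List Int → List Int
  | x :: y :: rest =>
      if x = y then length :: runsAux 1 (y :: rest)
      else runsAux (length + 1) (y :: rest)
  | _ => [length]

def solution_alt (M : Int) (A : List Int) : Int :=
  ((runsAux 1 A).map (fun m => PySem.Int.floordiv (m * (m + 1)) 2)).sum

-- ===== PRECONDITION & SPEC =====
def Spec_solution (M : Int) (A : List Int) (out : Int) : Prop := out = solution_alt M A
instance (M : Int) (A : List Int) (out : Int) : Decidable (Spec_solution M A out) := by unfold Spec_solution; infer_instance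

-- ===== CLAIM (what is proved, stated in full; the proofs are below) =====
def Claim_equal_solution : Prop := ∀ (M : Int) (A : List Int), Dom_solution M A → Spec_solution M A (solution M A)

-- ===== LEMMAS AND PROOFS =====

def tri (m : Int) : Int := PySem.Int.floordiv (m * (m + 1)) 2

lemma tri_succ (k : Int) : tri (k + 1) = tri k + (k + 1) := by
  unfold tri
  obtain ⟨t, ht⟩ := Int.even_mul_succ_self k
  have h2 : (k + 1) * (k + 1 + 1) = k * (k + 1) + 2 * (k + 1) := by ring
  rw [PySem.Int.floordiv_eq_ediv_of_pos (by omega : (0:Int) < 2),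
      PySem.Int.floordiv_eq_ediv_of_pos (by omega : (0:Int) < 2)]
  omega

lemma tri_one : tri 1 = 1 := by decide

lemma loop_eq (xs : List Int) : ∀ (k ans : Int),
    solutionLoop ans (tri k) (k + 1) xs = ans + ((runsAux k xs).map tri).sum := by
  induction xs with
  | nil => intro k ans; simp [solutionLoop, runsAux]
  | cons x t ih =>
    intro k ans
    cases t with
    | nil => simp [solutionLoop, runsAux]
    | cons y rest =>
      by_cases h : x = y
      · simp only [solutionLoop, runsAux, h, if_pos, ite_not, List.map_cons, List.sum_cons]
        have := ih 1 (ans + tri k)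
        rw [tri_one] at this
        norm_num at this ⊢
        rw [this]; ring
      · simp only [solutionLoop, runsAux, h, ite_not, if_false]
        have := ih (k + 1) ans
        rw [tri_succ] at this
        exact this

-- ===== VERDICT (by name: the statement is the Claim_ definition above) =====
theorem solution_spec : Claim_equal_solution := by
  intro M A _
  show solution M A = solution_alt M A
  have := loop_eq A 1 0
  rw [tri_one] at this
  unfold solution solution_alt
  norm_num at this
  exact this
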